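-- pv_equiv track=rewrite | github.com/pp-payphone/pp_coding | LeetCode/2022/easy/20221012/914.卡牌分组.py | hasGroupsSizeX
-- ===== SOURCE A (Python) =====
-- def hasGroupsSizeX(deck) -> bool:
--     d = {}
--     for each in deck:
--         d[each] = d.setdefault(each, 0) + 1
--     s = set(d.values())
--     m = min(s)
--     if m == 1:
--         return False
--     else:
--         for i in range(2, m + 1):
--             f = True
--             if m % i == 0:
--                 for each in s:
--                     if each % i != 0:
--                         f = False
--                         break
--             else:
--                 continue
--             if f:
--                 return True
--         return False
-- ===== SOURCE B (Python) =====
-- def hasGroupsSizeX(deck) -> bool: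
--     counts = {}
--     for each in deck:
--         counts[each] = counts.get(each, 0) + 1
--     g = 0
--     for c in counts.values():
--         a, b = c, g
--         while b:
--             a, b = b, a % b
--         g = a
--     return g >= 2
-- ===== Notes on version B (the rewrite author's own statement) =====
-- stated objective: simpler
-- what changed: Replaces the min-then-trial-divisor double scan over the set of counts by a single fold of a running gcd (explicit Euclid loop) over the count values, returning gcd >= 2.
-- crash fix: On an empty deck A raises ValueError (min() of an empty set) while B returns False (gcd of no counts is 0). — e.g. on hasGroupsSizeX([]): A raises ValueError, B returns false
import Mathlib
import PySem

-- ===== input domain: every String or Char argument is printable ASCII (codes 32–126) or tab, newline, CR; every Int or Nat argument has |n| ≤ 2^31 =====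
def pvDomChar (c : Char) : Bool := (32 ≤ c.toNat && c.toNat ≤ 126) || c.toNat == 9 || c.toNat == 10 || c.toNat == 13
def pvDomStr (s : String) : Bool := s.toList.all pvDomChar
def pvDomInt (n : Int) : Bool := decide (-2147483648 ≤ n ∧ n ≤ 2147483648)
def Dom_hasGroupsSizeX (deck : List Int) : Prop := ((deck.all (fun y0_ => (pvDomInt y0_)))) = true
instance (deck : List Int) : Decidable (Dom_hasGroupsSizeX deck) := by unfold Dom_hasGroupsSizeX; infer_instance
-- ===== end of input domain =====

-- B replaces A's min-then-trial-divisor scan over the set of counts by a single running-gcd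
-- (explicit Euclid loop) fold over the count values; on the empty deck A raises ValueError,
-- B returns False (see Raises_ block).

-- ===== PORT A =====
-- d[each] = d.setdefault(each, 0) + 1
def pvStepA (d : PySem.Dict Int Int) (each : Int) : PySem.Dict Int Int :=
  let d1 := d.setdefault each 0
  d1.insert each (d1.getD each 0 + 1)

-- the 'for i in range(2, m+1)' loop with its early return; the inner for-with-break is the all-scan f
def pvALoop (s : List Int) (m : Int) : List Int → Bool
  | [] => false
  | i :: rest =>
    if PySem.Int.mod m i = 0 then
      if s.all (fun each => PySem.Int.mod each i == 0) then true
      else pvALoop s m rest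
    else pvALoop s m rest

def hasGroupsSizeX (deck : List Int) : Bool :=
  let d := deck.foldl pvStepA PySem.Dict.empty
  let s : PySem.Set Int := PySem.Set.ofList d.values
  match PySem.List.min? s (fun x => x) with
  | none => false   -- Python: min() of an empty set raises ValueError; excluded by Pre_
  | some m => if m = 1 then false else pvALoop s m (PySem.List.pyRange 2 (m + 1) 1)

-- ===== PORT B =====
-- Termination fact for the Euclid while-loop (cited by pvEuclid's decreasing_by)
lemma pvMod_natAbs_lt (a : Int) {b : Int} (hb : b ≠ 0) :
    (PySem.Int.mod a b).natAbs < b.natAbs := by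
  rcases lt_trichotomy b 0 with h | h | h
  · have := PySem.Int.mod_neg_bounds a h
    omega
  · exact absurd h hb
  · have h1 := PySem.Int.mod_nonneg a h
    have h2 := PySem.Int.mod_lt a h
    omega

-- while b: a, b = b, a % b
def pvEuclid (a b : Int) : Int :=
  if h : b = 0 then a else pvEuclid b (PySem.Int.mod a b)
termination_by b.natAbs
decreasing_by exact pvMod_natAbs_lt a h

def hasGroupsSizeX_alt (deck : List Int) : Bool :=
  let counts := deck.foldl (fun d each => d.insert each (d.getD each 0 + 1)) PySem.Dict.empty
  let g := counts.values.foldl (fun g c => pvEuclid c g) 0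
  decide (2 ≤ g)

-- ===== PRECONDITION & SPEC =====
-- Pre_ excludes only the empty deck, on which A raises ValueError (min() of an empty set).
def Pre_hasGroupsSizeX (deck : List Int) : Prop := deck ≠ []
instance (deck : List Int) : Decidable (Pre_hasGroupsSizeX deck) := by unfold Pre_hasGroupsSizeX; infer_instance
def pvWitness_hasGroupsSizeX : List Int := [1, 1]

-- On the empty deck A raises ValueError (min() of an empty set); B returns False.
def Raises_hasGroupsSizeX (deck : List Int) : Prop := deck = []
instance (deck : List Int) : Decidable (Raises_hasGroupsSizeX deck) := by unfold Raises_hasGroupsSizeX; infer_instance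
def pvRaiseWitness_hasGroupsSizeX : List Int := []
def pvRaiseWitnessOut_hasGroupsSizeX : Bool := false

def Spec_hasGroupsSizeX (deck : List Int) (out : Bool) : Prop := out = hasGroupsSizeX_alt deck
instance (deck : List Int) (out : Bool) : Decidable (Spec_hasGroupsSizeX deck out) := by unfold Spec_hasGroupsSizeX; infer_instance

-- ===== CLAIM (what is proved, stated in full; the proofs are below) =====
def Claim_equal_hasGroupsSizeX : Prop := ∀ (deck : List Int), Dom_hasGroupsSizeX deck → Pre_hasGroupsSizeX deck → Spec_hasGroupsSizeX deck (hasGroupsSizeX deck)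
def Claim_raises_hasGroupsSizeX : Prop := (∀ (deck : List Int), Dom_hasGroupsSizeX deck → Raises_hasGroupsSizeX deck → ¬ Pre_hasGroupsSizeX deck) ∧ (Dom_hasGroupsSizeX (pvRaiseWitness_hasGroupsSizeX) ∧ Raises_hasGroupsSizeX (pvRaiseWitness_hasGroupsSizeX) ∧ hasGroupsSizeX_alt (pvRaiseWitness_hasGroupsSizeX) = pvRaiseWitnessOut_hasGroupsSizeX)

-- ===== LEMMAS AND PROOFS =====

-- A's setdefault-then-assign step is the plain counting insert
lemma pvStepA_eq (d : PySem.Dict Int Int) (k : Int) :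
    pvStepA d k = d.insert k (d.getD k 0 + 1) := by

  by_cases h : d.contains k = true
  · simp [pvStepA, PySem.Dict.setdefault, h]
  · have hb : d.contains k = false := by simpa using h
    have hmem : ∀ p ∈ d.items, (p.1 == k) = false := by
      intro p hp
      rcases Bool.eq_false_or_eq_true (p.1 == k) with ht | hf
      · exact absurd (by
          simp only [PySem.Dict.contains, List.any_eq_true]
          exact ⟨p, hp, ht⟩) h
      · exact hf
    have hfind : d.items.find? (fun p => p.1 == k) = none :=
      List.find?_eq_none.mpr (fun p hp => by simp [hmem p hp])
    have hd1 : d.setdefault k 0 = PySem.Dict.mk (d.items ++ [(k, 0)]) := by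
      simp [PySem.Dict.setdefault, h]
    have hget1 : (PySem.Dict.mk (d.items ++ [(k, 0)])).getD k 0 = 0 := by
      simp [PySem.Dict.getD, PySem.Dict.get?, List.find?_append, hfind]
    have hcont1 : (PySem.Dict.mk (d.items ++ [(k, 0)])).contains k = true := by
      simp [PySem.Dict.contains]
    have hget0 : d.getD k 0 = 0 := by
      simp [PySem.Dict.getD, PySem.Dict.get?, hfind]
    have hmap : d.items.map (fun p => if p.1 = k then (k, (1 : Int)) else p) = d.items := by
      rw [List.map_congr_left (fun p hp => by
        have hne := hmem p hp
        simp only [beq_eq_false_iff_ne, ne_eq] at hne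
        simp [hne] : ∀ p ∈ d.items, _ = id p)]
      exact List.map_id _
    simp only [pvStepA, hd1, hget1]
    apply PySem.Dict.ext
    simp [PySem.Dict.insert, hcont1, hb, hget0, hmap]

-- both ports build Counter(deck)
lemma pvACount_eq (deck : List Int) :
    deck.foldl pvStepA PySem.Dict.empty = PySem.Dict.counter deck := by

  have hf : pvStepA = fun d each => d.insert each (d.getD each 0 + 1) :=
    funext fun d => funext fun k => pvStepA_eq d k
  rw [hf]
  exact PySem.Dict.foldl_insert_getD_add_one_eq_counter deck

-- the Euclid loop computes Nat.gcd on casts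
lemma pvEuclid_cast (m n : Nat) : pvEuclid (m : Int) (n : Int) = ((Nat.gcd n m : Nat) : Int) := by

  induction n using Nat.strong_induction_on generalizing m with
  | _ n ih =>
    rw [pvEuclid]
    by_cases h : (n : Int) = 0
    · have h0 : n = 0 := by exact_mod_cast h
      subst h0
      simp
    · have hn : n ≠ 0 := fun h0 => h (by exact_mod_cast h0)
      rw [dif_neg h, PySem.Int.mod_natCast m n,
        ih (m % n) (Nat.mod_lt _ (Nat.pos_of_ne_zero hn)) n, Nat.gcd_rec n m]

-- the gcd fold over nonnegative ints, on the Nat side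
lemma pvFold_cast (vs : List Int) (h : ∀ v ∈ vs, 0 ≤ v) (n : Nat) :
    vs.foldl (fun g c => pvEuclid c g) (n : Int)
      = ((vs.foldl (fun g c => Nat.gcd g c.toNat) n : Nat) : Int) := by

  induction vs generalizing n with
  | nil => simp
  | cons c t ih =>
    have hc : (0 : Int) ≤ c := h c (by simp)
    have hstep : pvEuclid c (n : Int) = ((Nat.gcd n c.toNat : Nat) : Int) := by
      conv_lhs => rw [← Int.toNat_of_nonneg hc]
      exact pvEuclid_cast c.toNat n
    simp only [List.foldl_cons, hstep]
    exact ih (fun v hv => h v (by simp [hv])) (Nat.gcd n c.toNat)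

lemma pvG_dvd (vs : List Int) (n : Nat) :
    (∀ v ∈ vs, (vs.foldl (fun g c => Nat.gcd g c.toNat) n) ∣ v.toNat)
      ∧ (vs.foldl (fun g c => Nat.gcd g c.toNat) n) ∣ n := by

  induction vs generalizing n with
  | nil => exact ⟨by simp, by simp⟩
  | cons c t ih =>
    obtain ⟨ht, hn'⟩ := ih (Nat.gcd n c.toNat)
    refine ⟨?_, dvd_trans hn' (Nat.gcd_dvd_left _ _)⟩
    intro v hv
    rcases List.mem_cons.mp hv with rfl | hv'
    · exact dvd_trans hn' (Nat.gcd_dvd_right _ _)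
    · exact ht v hv' 

lemma pvG_max (vs : List Int) (n : Nat) (k : Nat) (hn : k ∣ n)
    (hv : ∀ v ∈ vs, k ∣ v.toNat) : k ∣ vs.foldl (fun g c => Nat.gcd g c.toNat) n := by

  induction vs generalizing n with
  | nil => simpa using hn
  | cons c t ih =>
    exact ih (Nat.gcd n c.toNat) (Nat.dvd_gcd hn (hv c (by simp)))
      (fun w hw => hv w (by simp [hw]))

lemma pvALoop_iff (s : List Int) (m : Int) (l : List Int) :
    pvALoop s m l = true ↔
      ∃ i ∈ l, PySem.Int.mod m i = 0 ∧ ∀ v ∈ s, PySem.Int.mod v i = 0 := by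

  induction l with
  | nil => simp [pvALoop]
  | cons i rest ih =>
    simp only [pvALoop]
    split_ifs with h1 h2
    · simp only [List.all_eq_true, beq_iff_eq] at h2
      simp only [true_iff]
      exact ⟨i, by simp, h1, h2⟩
    · simp only [List.all_eq_true, beq_iff_eq] at h2
      rw [ih]
      constructor
      · rintro ⟨j, hj, hmj, hall⟩
        exact ⟨j, by simp [hj], hmj, hall⟩
      · rintro ⟨j, hj, hmj, hall⟩
        rcases List.mem_cons.mp hj with rfl | hj'
        · exact absurd hall h2
        · exact ⟨j, hj', hmj, hall⟩
    · rw [ih]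
      constructor
      · rintro ⟨j, hj, hmj, hall⟩
        exact ⟨j, by simp [hj], hmj, hall⟩
      · rintro ⟨j, hj, hmj, hall⟩
        rcases List.mem_cons.mp hj with rfl | hj'
        · exact absurd hmj h1
        · exact ⟨j, hj', hmj, hall⟩

-- ===== VERDICT (by name: the statement is the Claim_ definition above) =====
theorem hasGroupsSizeX_spec : Claim_equal_hasGroupsSizeX := by
  intro deck _ hpre
  unfold Spec_hasGroupsSizeX
  simp only [hasGroupsSizeX, hasGroupsSizeX_alt]
  rw [pvACount_eq, PySem.Dict.foldl_insert_getD_add_one_eq_counter]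
  have hkeys : (PySem.Dict.counter deck).keys = PySem.Set.ofList deck := PySem.Dict.keys_counter deck
  have hnodup := PySem.Dict.nodup_keys_counter deck
  have hvals : (PySem.Dict.counter deck).values
      = (PySem.Dict.counter deck).keys.map (fun k => (PySem.Dict.counter deck).getD k 0) :=
    PySem.Dict.values_eq_map_keys _ hnodup 0
  set vs := (PySem.Dict.counter deck).values with hvs
  have hpos : ∀ v ∈ vs, 1 ≤ v := by
    intro v hv
    rw [hvals, List.mem_map] at hv
    obtain ⟨k, hk, rfl⟩ := hv
    rw [PySem.Dict.getD_counter]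
    have hkd : k ∈ deck := (PySem.Set.mem_ofList deck k).mp (hkeys ▸ hk)
    have := List.count_pos_iff.mpr hkd
    omega
  have hne : vs ≠ [] := by
    obtain ⟨x, t, rfl⟩ := List.exists_cons_of_ne_nil hpre
    have hx : x ∈ (PySem.Dict.counter (x :: t)).keys := by
      rw [hkeys, PySem.Set.mem_ofList]
      simp
    intro h0
    rw [hvals, List.map_eq_nil_iff] at h0
    rw [h0] at hx
    simp at hx
  -- the set of counts
  have hmemS : ∀ v, v ∈ PySem.Set.ofList vs ↔ v ∈ vs := fun v => PySem.Set.mem_ofList vs v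
  have hsne : PySem.Set.ofList vs ≠ [] := by
    obtain ⟨x, t, hx⟩ := List.exists_cons_of_ne_nil hne
    exact List.ne_nil_of_mem ((hmemS x).mpr (by rw [hx]; simp))
  obtain ⟨m, hm⟩ : ∃ m, PySem.List.min? (PySem.Set.ofList vs) (fun x => x) = some m := by
    cases hc : PySem.List.min? (PySem.Set.ofList vs) (fun x => x) with
    | none =>
        rw [PySem.List.min?_eq_none_iff] at hc
        exact absurd hc hsne
    | some m => exact ⟨m, rfl⟩
  rw [hm]
  have hmvs : m ∈ vs := (hmemS m).mp (PySem.List.min?_mem hm)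
  have hm1 : 1 ≤ m := hpos m hmvs
  -- the gcd fold
  have hfold : vs.foldl (fun g c => pvEuclid c g) 0
      = ((vs.foldl (fun g c => Nat.gcd g c.toNat) 0 : Nat) : Int) := by
    have h0 : ((0 : Nat) : Int) = 0 := rfl
    rw [← h0]
    exact pvFold_cast vs (fun v hv => le_trans (by norm_num) (hpos v hv)) 0
  rw [hfold]
  set N := vs.foldl (fun g c => Nat.gcd g c.toNat) 0 with hN
  have hNdvd : ∀ v ∈ vs, N ∣ v.toNat := (pvG_dvd vs 0).1
  have hNm : N ∣ m.toNat := hNdvd m hmvs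
  have hmpos : 1 ≤ m.toNat := by omega
  have hNpos : 0 < N := by
    rcases Nat.eq_zero_or_pos N with h0 | h
    · rw [h0] at hNm
      have := Nat.eq_zero_of_zero_dvd hNm
      omega
    · exact h
  have hNleM : N ≤ m.toNat := Nat.le_of_dvd (by omega) hNm
  change (if m = 1 then false else pvALoop (PySem.Set.ofList vs) m (PySem.List.pyRange 2 (m + 1) 1))
      = decide (2 ≤ (N : Int))
  by_cases hm1' : m = 1
  · subst hm1'
    have hN1 : N = 1 := Nat.dvd_one.mp (by simpa using hNm)
    rw [if_pos rfl, hN1]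
    norm_num
  · rw [if_neg hm1']
    have hiff : pvALoop (PySem.Set.ofList vs) m (PySem.List.pyRange 2 (m + 1) 1) = true
        ↔ 2 ≤ (N : Int) := by
      rw [pvALoop_iff]
      constructor
      · rintro ⟨i, hirange, him, hall⟩
        obtain ⟨hi2, _⟩ := PySem.List.mem_pyRange_one.mp hirange
        have hallvs : ∀ v ∈ vs, i ∣ v := fun v hv =>
          (PySem.Int.mod_eq_zero_iff_dvd v i).mp (hall v ((hmemS v).mpr hv))
        have hkdvd : ∀ v ∈ vs, i.toNat ∣ v.toNat := by
          intro v hv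
          have h1 := hallvs v hv
          have hv1 := hpos v hv
          rw [← Int.toNat_of_nonneg (by omega : (0:Int) ≤ i),
              ← Int.toNat_of_nonneg (by omega : (0:Int) ≤ v)] at h1
          exact_mod_cast h1
        have hdN : i.toNat ∣ N := pvG_max vs 0 i.toNat (dvd_zero _) hkdvd
        have : i.toNat ≤ N := Nat.le_of_dvd hNpos hdN
        omega
      · intro h2
        have h2' : 2 ≤ N := by omega
        refine ⟨(N : Int), ?_, ?_, ?_⟩
        · rw [PySem.List.mem_pyRange_one]
          omega
        · rw [PySem.Int.mod_eq_zero_iff_dvd, ← Int.toNat_of_nonneg (by omega : (0:Int) ≤ m)]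
          exact_mod_cast hNm
        · intro v hv
          have hvv := (hmemS v).mp hv
          have hv1 := hpos v hvv
          rw [PySem.Int.mod_eq_zero_iff_dvd,
              ← Int.toNat_of_nonneg (by omega : (0:Int) ≤ v)]
          exact_mod_cast hNdvd v hvv
    rw [Bool.eq_iff_iff, hiff]
    simp

def hasGroupsSizeX_raises : Claim_raises_hasGroupsSizeX := by
  unfold Claim_raises_hasGroupsSizeX
  exact ⟨fun deck _ h => by simp [Raises_hasGroupsSizeX] at h; simp [Pre_hasGroupsSizeX, h], by decide⟩
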